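-- pv_equiv track=rewrite | github.com/fat-forensics/fat-forensics | fatf/accountability/data/testing.py | get_depthoftree_zipcode
-- ===== SOURCE A (Python) =====
-- def get_depthoftree_zipcode(attribute):
--     p = len(attribute[0])
--     if len(set(attribute)) == 1:
--         return 0
--
--     for idx in range(p):
--         l = [item[idx] for item in attribute]
--         if len(set(l)) != 1:
--             break
--     return p - idx
-- ===== SOURCE B (Python) =====
-- def get_depthoftree_zipcode(attribute):
--     # One row-wise pass: shrink the common-prefix length L of attribute[0]
--     # against each later string; no per-column sets, no all-equal special case.
--     first = attribute[0]
--     L = len(first)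
--     for s in attribute[1:]:
--         k = 0
--         m = min(L, len(s))
--         while k < m and s[k] == first[k]:
--             k += 1
--         L = k
--     return len(first) - L
-- ===== Notes on version B (the rewrite author's own statement) =====
-- stated objective: simpler
-- what changed: Replaces A's per-position column scans with a Python set built per column (plus a whole-list set for the all-equal special case) by a single row-wise pass that shrinks the common-prefix length of attribute[0] against each later string, needing no sets and no special case.
-- intended difference: On lists where every string has attribute[0] as a prefix and some string strictly extends it, A's loop finds no differing column and returns 1 from its leftover loop index, while B returns 0 = len(attribute[0]) minus the full common prefix, the intended value. — e.g. on get_depthoftree_zipcode(["a", "ab"]): A returns 1, B returns 0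
import Mathlib
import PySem

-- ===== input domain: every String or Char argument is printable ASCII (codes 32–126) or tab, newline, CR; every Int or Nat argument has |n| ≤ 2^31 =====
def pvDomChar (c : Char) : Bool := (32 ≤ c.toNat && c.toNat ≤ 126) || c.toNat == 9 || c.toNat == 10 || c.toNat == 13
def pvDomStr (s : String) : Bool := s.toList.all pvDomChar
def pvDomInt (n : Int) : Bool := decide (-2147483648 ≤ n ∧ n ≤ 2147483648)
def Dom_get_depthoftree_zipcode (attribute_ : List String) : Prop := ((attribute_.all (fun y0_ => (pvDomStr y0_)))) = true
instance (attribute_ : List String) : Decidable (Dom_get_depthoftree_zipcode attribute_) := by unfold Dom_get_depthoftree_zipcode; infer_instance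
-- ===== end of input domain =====

-- B replaces A's per-column set scans (and all-equal special case) by one row-wise
-- pass shrinking the common-prefix length of attribute[0] against each later string (objective: simpler).

-- ===== PORT A =====
-- 'for idx in range(p): l = [item[idx] for item in attribute]; if len(set(l)) != 1: break'; returns the idx the loop leaves behind.
-- item[idx] is ported with pyGet? (Python raises IndexError when idx ≥ len(item); inputs
-- reaching such an access are outside Pre_, where the .getD ' ' default is never reached).
def pvALoop (attribute_ : List String) (p idx : Nat) : Nat :=
  if _h : idx < p then
    let l : List Char := attribute_.map (fun item => (PySem.Str.pyGet? item (idx : Int)).getD ' ')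
    if (PySem.Set.ofList l).length ≠ 1 then idx
    else if idx + 1 < p then pvALoop attribute_ p (idx + 1) else idx
  else idx
termination_by p - idx

def get_depthoftree_zipcode (attribute_ : List String) : Int :=
  let first := (PySem.List.pyGet? attribute_ 0).getD ""   -- attribute[0]; IndexError on [] is outside Pre_
  let p := first.toList.length   -- len(attribute[0]) as the Nat loop bound
  if (PySem.Set.ofList attribute_).length = 1 then 0
  else ((p : Int) - (pvALoop attribute_ p 0 : Int))

-- ===== PORT B =====
-- 'm = min(L, len(s)); while k < m and s[k] == first[k]: k += 1'; k < m keeps both s[k] and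
-- first[k] in range, so the .getD ' ' default of pyGet? is never reached.
def pvBLcp (s first : List Char) (m k : Nat) : Nat :=
  if _h : k < m then
    if (PySem.List.pyGet? s (k : Int)).getD ' ' = (PySem.List.pyGet? first (k : Int)).getD ' '
    then pvBLcp s first m (k + 1) else k
  else k
termination_by m - k

def get_depthoftree_zipcode_alt (attribute_ : List String) : Int :=
  let first := (PySem.List.pyGet? attribute_ 0).getD ""
  let p := first.toList.length   -- len(attribute[0]) as the Nat loop bound
  let L := (PySem.List.slice attribute_ (some 1) none).foldl
             (fun L s => pvBLcp s.toList first.toList (min L s.toList.length) 0) p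
  (p : Int) - (L : Int)

-- ===== PRECONDITION & SPEC =====
-- Pre_ holds exactly where A returns: it excludes the empty list (IndexError on attribute[0]),
-- lists in which some proper prefix of the first string is extended by every string (A's column
-- scan reaches the short string's end and raises IndexError), and an empty first string next to a
-- nonempty one (the loop never runs and 'idx' is unbound: NameError).
def Pre_get_depthoftree_zipcode (attribute_ : List String) : Prop :=
  attribute_ ≠ [] ∧
  (∀ s ∈ attribute_, s ≠ attribute_.headD "" → s.toList <+: (attribute_.headD "").toList →
     ¬ (∀ t ∈ attribute_, s.toList <+: t.toList)) ∧
  (attribute_.headD "" = "" → ∀ s ∈ attribute_, s = "")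
instance (attribute_ : List String) : Decidable (Pre_get_depthoftree_zipcode attribute_) := by
  unfold Pre_get_depthoftree_zipcode; infer_instance

def pvWitness_get_depthoftree_zipcode : List String := ["ab", "ad", "ab"]

-- On lists where every string has the first string as a prefix and some string strictly extends
-- it, A's loop finds no differing column and returns 1 from its leftover loop index, while B
-- returns 0 = len(attribute[0]) minus the full common prefix, the intended value.
def D_get_depthoftree_zipcode (attribute_ : List String) : Prop :=
  (∀ s ∈ attribute_, (attribute_.headD "").toList <+: s.toList) ∧
  ¬ (∀ s ∈ attribute_, s = attribute_.headD "")
instance (attribute_ : List String) : Decidable (D_get_depthoftree_zipcode attribute_) := by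
  unfold D_get_depthoftree_zipcode; infer_instance

def Spec_get_depthoftree_zipcode (attribute_ : List String) (out : Int) : Prop := ¬ D_get_depthoftree_zipcode attribute_ → out = get_depthoftree_zipcode_alt attribute_
instance (attribute_ : List String) (out : Int) : Decidable (Spec_get_depthoftree_zipcode attribute_ out) := by unfold Spec_get_depthoftree_zipcode; infer_instance

def pvDiffWitness_get_depthoftree_zipcode : List String := ["a", "ab"]
def pvDiffWitnessOut_get_depthoftree_zipcode : Int × Int := (1, 0)

-- ===== CLAIM (what is proved, stated in full; the proofs are below) =====
def Claim_unchanged_get_depthoftree_zipcode : Prop := ∀ (attribute_ : List String), Dom_get_depthoftree_zipcode attribute_ → Pre_get_depthoftree_zipcode attribute_ → Spec_get_depthoftree_zipcode attribute_ (get_depthoftree_zipcode attribute_)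
def Claim_changed_get_depthoftree_zipcode : Prop := Dom_get_depthoftree_zipcode (pvDiffWitness_get_depthoftree_zipcode) ∧ Pre_get_depthoftree_zipcode (pvDiffWitness_get_depthoftree_zipcode) ∧ D_get_depthoftree_zipcode (pvDiffWitness_get_depthoftree_zipcode) ∧ get_depthoftree_zipcode (pvDiffWitness_get_depthoftree_zipcode) = pvDiffWitnessOut_get_depthoftree_zipcode.1 ∧ get_depthoftree_zipcode_alt (pvDiffWitness_get_depthoftree_zipcode) = pvDiffWitnessOut_get_depthoftree_zipcode.2 ∧ pvDiffWitnessOut_get_depthoftree_zipcode.1 ≠ pvDiffWitnessOut_get_depthoftree_zipcode.2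
def Claim_exact_get_depthoftree_zipcode : Prop := ∀ (attribute_ : List String), Dom_get_depthoftree_zipcode attribute_ → Pre_get_depthoftree_zipcode attribute_ → D_get_depthoftree_zipcode attribute_ → get_depthoftree_zipcode attribute_ ≠ get_depthoftree_zipcode_alt attribute_

-- ===== LEMMAS AND PROOFS =====

-- longest common prefix of two char lists (proof-side reference function)
def pvLcp : List Char → List Char → Nat
  | a :: s, b :: t => if a = b then pvLcp s t + 1 else 0
  | _, _ => 0

theorem pvLcp_le_left : ∀ s t : List Char, pvLcp s t ≤ s.length := by
  intro s; induction s with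
  | nil => intro t; cases t <;> simp [pvLcp]
  | cons a s ih => intro t; cases t with
    | nil => simp [pvLcp]
    | cons b t => simp only [pvLcp]; split_ifs <;> simp; exact ih t

theorem pvLcp_le_right : ∀ s t : List Char, pvLcp s t ≤ t.length := by
  intro s; induction s with
  | nil => intro t; cases t <;> simp [pvLcp]
  | cons a s ih => intro t; cases t with
    | nil => simp [pvLcp]
    | cons b t => simp only [pvLcp]; split_ifs <;> simp; exact ih t

theorem pvLcp_self : ∀ s : List Char, pvLcp s s = s.length := by
  intro s; induction s with
  | nil => simp [pvLcp]
  | cons a s ih => simp [pvLcp, ih]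

theorem getD_eq_of_lt_pvLcp : ∀ (s t : List Char) (j : Nat), j < pvLcp s t →
    s.getD j ' ' = t.getD j ' ' := by
  intro s; induction s with
  | nil => intro t j h; cases t <;> simp [pvLcp] at h
  | cons a s ih => intro t j h; cases t with
    | nil => simp [pvLcp] at h
    | cons b t =>
      simp only [pvLcp] at h
      by_cases hab : a = b
      · simp [hab] at h
        cases j with
        | zero => simp [hab]
        | succ j => simpa using ih t j (by omega)
      · simp [hab] at h

theorem getD_ne_pvLcp : ∀ (s t : List Char), pvLcp s t < s.length → pvLcp s t < t.length →
    s.getD (pvLcp s t) ' ' ≠ t.getD (pvLcp s t) ' ' := by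
  intro s; induction s with
  | nil => intro t h1 _; simp at h1
  | cons a s ih => intro t h1 h2; cases t with
    | nil => simp at h2
    | cons b t =>
      by_cases hab : a = b
      · have hl : pvLcp (a :: s) (b :: t) = pvLcp s t + 1 := by simp [pvLcp, hab]
        rw [hl] at h1 h2 ⊢
        simp only [List.length_cons] at h1 h2
        simpa [List.getD_cons_succ] using ih t (by omega) (by omega)
      · have hl : pvLcp (a :: s) (b :: t) = 0 := by simp [pvLcp, hab]
        rw [hl]
        simpa [List.getD_cons_zero] using hab

theorem prefix_left_of_pvLcp : ∀ (s t : List Char), pvLcp s t = s.length → s <+: t := by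
  intro s; induction s with
  | nil => intro t _; exact List.nil_prefix
  | cons a s ih => intro t h; cases t with
    | nil => simp [pvLcp] at h
    | cons b t =>
      by_cases hab : a = b
      · subst hab
        simp [pvLcp] at h
        exact (List.prefix_cons_inj a).mpr (ih t h)
      · simp [pvLcp, hab] at h

theorem prefix_right_of_pvLcp : ∀ (s t : List Char), pvLcp s t = t.length → t <+: s := by
  intro s; induction s with
  | nil => intro t h; cases t with
    | nil => exact List.nil_prefix
    | cons b t => simp [pvLcp] at h
  | cons a s ih => intro t h; cases t with
    | nil => exact List.nil_prefix
    | cons b t =>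
      by_cases hab : a = b
      · simp [pvLcp, hab] at h
        have := ih t h
        rw [hab]
        exact (List.prefix_cons_inj b).mpr this
      · simp [pvLcp, hab] at h

theorem take_prefix_of_le_pvLcp : ∀ (s t : List Char) (k : Nat), k ≤ pvLcp s t →
    t.take k <+: s := by
  intro s; induction s with
  | nil =>
    intro t k h
    have hk : k = 0 := by cases t <;> simp [pvLcp] at h <;> omega
    subst hk
    simp
  | cons a s ih =>
    intro t k h
    cases t with
    | nil =>
      have hk : k = 0 := by simp [pvLcp] at h; omega
      subst hk
      simp
    | cons b t =>
      cases k with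
      | zero => simp
      | succ k =>
        by_cases hab : a = b
        · simp only [pvLcp, hab, if_true] at h
          have hih := ih t k (by omega)
          rw [List.take_succ_cons, hab]
          exact (List.prefix_cons_inj b).mpr hih
        · simp [pvLcp, hab] at h

theorem pvLcp_of_prefix_right : ∀ (s t : List Char), t <+: s → pvLcp s t = t.length := by
  intro s; induction s with
  | nil => intro t h; rw [List.prefix_nil.mp h]; simp [pvLcp]
  | cons a s ih => intro t h; cases t with
    | nil => simp [pvLcp]
    | cons b t =>
      obtain ⟨u, hu⟩ := h
      simp only [List.cons_append] at hu
      have hab : b = a := (List.cons.injEq _ _ _ _ ▸ hu).1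
      have ht : t <+: s := ⟨u, (List.cons.injEq _ _ _ _ ▸ hu).2⟩
      simp [pvLcp, hab, ih t ht]

-- B's inner while-loop computes min m (pvLcp s t)
theorem pvBLcp_eq (s t : List Char) : ∀ n m k, m - k = n → k ≤ m → k ≤ pvLcp s t →
    m ≤ s.length → m ≤ t.length →
    pvBLcp s t m k = min m (pvLcp s t) := by
  intro n
  induction n with
  | zero =>
    intro m k hn hk hklcp hs ht
    have hkm : k = m := by omega
    subst hkm
    rw [pvBLcp]
    simp only [lt_irrefl, dif_neg, not_false_iff]
    omega
  | succ n ih =>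
    intro m k hn hk hklcp hs ht
    have hkm : k < m := by omega
    rw [pvBLcp]
    simp only [hkm, dif_pos]
    have hg : ∀ (u : List Char), k < u.length →
        (PySem.List.pyGet? u (k : Int)).getD ' ' = u.getD k ' ' := by
      intro u hu
      simp [List.getD_eq_getElem?_getD]
    rw [hg s (by omega), hg t (by omega)]
    by_cases hkc : k < pvLcp s t
    · rw [if_pos (getD_eq_of_lt_pvLcp s t k hkc)]
      exact ih m (k + 1) (by omega) (by omega) (by omega) hs ht
    · have hke : k = pvLcp s t := by omega
      rw [hke]
      rw [if_neg (getD_ne_pvLcp s t (by omega) (by omega))]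
      omega

-- folding min over a list: basic facts
theorem foldl_min_le_init (f : String → Nat) : ∀ (l : List String) (L : Nat),
    l.foldl (fun L s => min L (f s)) L ≤ L := by
  intro l; induction l with
  | nil => intro L; simp
  | cons a l ih =>
    intro L
    simp only [List.foldl_cons]
    exact le_trans (ih _) (Nat.min_le_left _ _)

theorem foldl_min_le_mem (f : String → Nat) : ∀ (l : List String) (L : Nat) (s : String),
    s ∈ l → l.foldl (fun L s => min L (f s)) L ≤ f s := by
  intro l; induction l with
  | nil => intro L s h; simp at h
  | cons a l ih =>
    intro L s h
    simp only [List.foldl_cons]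
    rcases List.mem_cons.mp h with h | h
    · subst h; exact le_trans (foldl_min_le_init f l _) (Nat.min_le_right _ _)
    · exact ih _ s h

theorem foldl_min_cases (f : String → Nat) : ∀ (l : List String) (L : Nat),
    l.foldl (fun L s => min L (f s)) L = L ∨ ∃ s ∈ l, l.foldl (fun L s => min L (f s)) L = f s := by
  intro l; induction l with
  | nil => intro L; left; rfl
  | cons a l ih =>
    intro L
    simp only [List.foldl_cons]
    rcases ih (min L (f a)) with h | ⟨s, hs, h⟩
    · by_cases hla : L ≤ f a
      · left; rw [h]; omega
      · right; exact ⟨a, by simp, by rw [h]; omega⟩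
    · right; exact ⟨s, by simp [hs], h⟩

theorem le_foldl_min (f : String → Nat) : ∀ (l : List String) (L k : Nat),
    k ≤ L → (∀ s ∈ l, k ≤ f s) → k ≤ l.foldl (fun L s => min L (f s)) L := by
  intro l; induction l with
  | nil => intro L k h _; simpa
  | cons a l ih =>
    intro L k h hall
    simp only [List.foldl_cons]
    exact ih _ k (by have := hall a (by simp); omega)
      (fun s hs => hall s (by simp [hs]))

-- B's fold equals the min-fold of pvLcp values
theorem foldl_pvBLcp_eq (fc : List Char) : ∀ (l : List String) (L : Nat), L ≤ fc.length →
    l.foldl (fun L s => pvBLcp s.toList fc (min L s.toList.length) 0) L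
      = l.foldl (fun L s => min L (pvLcp s.toList fc)) L := by
  intro l; induction l with
  | nil => intro L _; rfl
  | cons a l ih =>
    intro L hL
    have hlcp : pvLcp a.toList fc ≤ a.toList.length := pvLcp_le_left _ _
    have h1 : pvBLcp a.toList fc (min L a.toList.length) 0
        = min (min L a.toList.length) (pvLcp a.toList fc) :=
      pvBLcp_eq a.toList fc (min L a.toList.length - 0) (min L a.toList.length) 0 rfl
        (by omega) (by omega) (by omega) (by omega)
    have h2 : min (min L a.toList.length) (pvLcp a.toList fc) = min L (pvLcp a.toList fc) := by
      omega
    simp only [List.foldl_cons, h1, h2]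
    exact ih _ (by omega)

-- a Python set has length 1 iff all elements of the source list equal its head
theorem nodup_len_le_one {α : Type} (a : α) : ∀ (l : List α), l.Nodup → (∀ x ∈ l, x = a) →
    l.length ≤ 1 := by
  intro l hnd hall
  match l with
  | [] => simp
  | [x] => simp
  | x :: y :: t =>
    exfalso
    have hx : x = a := hall x (by simp)
    have hy : y = a := hall y (by simp)
    simp [hx, hy] at hnd

theorem set_len_one_iff {α : Type} [BEq α] [LawfulBEq α] (a : α) (l : List α) :
    (PySem.Set.ofList (a :: l)).length = 1 ↔ ∀ x ∈ a :: l, x = a := by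
  constructor
  · intro h x hx
    obtain ⟨b, hS⟩ := List.length_eq_one_iff.mp h
    have hxb : x ∈ PySem.Set.ofList (a :: l) := (PySem.Set.mem_ofList _ _).mpr hx
    have hab : a ∈ PySem.Set.ofList (a :: l) := (PySem.Set.mem_ofList _ _).mpr (by simp)
    rw [hS] at hxb hab
    simp at hxb hab
    rw [hxb, hab]
  · intro hall
    have hnd : (PySem.Set.ofList (a :: l)).Nodup := PySem.Set.nodup_ofList _
    have hle : (PySem.Set.ofList (a :: l)).length ≤ 1 :=
      nodup_len_le_one a _ hnd (fun x hx => hall x ((PySem.Set.mem_ofList _ _).mp hx))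
    have hmem : a ∈ PySem.Set.ofList (a :: l) := (PySem.Set.mem_ofList _ _).mpr (by simp)
    have : 0 < (PySem.Set.ofList (a :: l)).length := List.length_pos_of_mem hmem
    omega

-- A's column loop returns the common-prefix length when it is < p
theorem pvALoop_eq (first : String) (rest : List String) (p : Nat)
    (hp : p = first.toList.length)
    (cpl : Nat)
    (hmin : ∃ s ∈ rest, pvLcp s.toList first.toList = cpl ∧ cpl < s.toList.length)
    (hcpl : cpl = rest.foldl (fun L s => min L (pvLcp s.toList first.toList)) p)
    (hlt : cpl < p) :
    ∀ n idx, cpl - idx = n → idx ≤ cpl → pvALoop (first :: rest) p idx = cpl := by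
  intro n
  induction n with
  | zero =>
    intro idx hn hidx
    have hie : idx = cpl := by omega
    subst hie
    rw [pvALoop]
    simp only [hlt, dif_pos]
    obtain ⟨s, hs, hlcp0, hslen0⟩ := hmin
    · have hlcp : pvLcp s.toList first.toList = idx := hlcp0
      have hslen : idx < s.toList.length := hslen0
      have hne : s.toList.getD idx ' ' ≠ first.toList.getD idx ' ' := by
        have := getD_ne_pvLcp s.toList first.toList (by omega) (by omega)
        rwa [hlcp] at this
      have hg : ∀ (u : String), idx < u.toList.length →
          (PySem.Str.pyGet? u (idx : Int)).getD ' ' = u.toList.getD idx ' ' := by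
        intro u hu
        simp [List.getD_eq_getElem?_getD]
      rw [if_pos]
      intro hone
      rw [List.map_cons] at hone
      have := (set_len_one_iff _ _).mp hone
      have h1 := this ((PySem.Str.pyGet? s (idx : Int)).getD ' ')
        (by simp only [List.mem_cons, List.mem_map]; right; exact ⟨s, hs, rfl⟩)
      rw [hg s (by omega), hg first (by omega)] at h1
      exact hne h1
  | succ n ih =>
    intro idx hn hidx
    have hlt' : idx < cpl := by omega
    rw [pvALoop]
    simp only [show idx < p by omega, dif_pos]
    have hg : ∀ (u : String), idx < u.toList.length →
        (PySem.Str.pyGet? u (idx : Int)).getD ' ' = u.toList.getD idx ' ' := by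
      intro u hu
      simp [List.getD_eq_getElem?_getD]
    have hconst : (PySem.Set.ofList ((first :: rest).map
        (fun item => (PySem.Str.pyGet? item (idx : Int)).getD ' '))).length = 1 := by
      rw [List.map_cons]
      apply (set_len_one_iff _ _).mpr
      intro x hx
      rcases List.mem_cons.mp hx with hx | hx
      · exact hx
      · rcases List.mem_map.mp hx with ⟨s, hs, hxs⟩
        have hle : cpl ≤ pvLcp s.toList first.toList := by
          rw [hcpl]; exact foldl_min_le_mem _ rest p s hs
        have hslen : idx < s.toList.length := by
          have := pvLcp_le_left s.toList first.toList
          omega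
        rw [← hxs, hg s (by omega), hg first (by omega)]
        exact getD_eq_of_lt_pvLcp s.toList first.toList idx (by omega)
    rw [if_neg (by simpa using hconst), if_pos (by omega)]
    exact ih (idx + 1) (by omega) (by omega)

-- A's column loop finds no differing column when every string extends first: leftover idx = p-1
theorem pvALoop_nobreak (first : String) (rest : List String) (p : Nat)
    (hp : p = first.toList.length)
    (hext : ∀ s ∈ rest, p ≤ pvLcp s.toList first.toList) (hp1 : 1 ≤ p) :
    ∀ n idx, p - 1 - idx = n → idx ≤ p - 1 → pvALoop (first :: rest) p idx = p - 1 := by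
  intro n
  induction n with
  | zero =>
    intro idx hn hidx
    have hie : idx = p - 1 := by omega
    subst hie
    rw [pvALoop]
    simp only [show p - 1 < p by omega, dif_pos]
    split_ifs with h1 h2 <;> omega
  | succ n ih =>
    intro idx hn hidx
    rw [pvALoop]
    simp only [show idx < p by omega, dif_pos]
    have hg : ∀ (u : String), idx < u.toList.length →
        (PySem.Str.pyGet? u (idx : Int)).getD ' ' = u.toList.getD idx ' ' := by
      intro u hu
      simp [List.getD_eq_getElem?_getD]
    have hconst : (PySem.Set.ofList ((first :: rest).map
        (fun item => (PySem.Str.pyGet? item (idx : Int)).getD ' '))).length = 1 := by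
      rw [List.map_cons]
      apply (set_len_one_iff _ _).mpr
      intro x hx
      rcases List.mem_cons.mp hx with hx | hx
      · exact hx
      · rcases List.mem_map.mp hx with ⟨s, hs, hxs⟩
        have hle : p ≤ pvLcp s.toList first.toList := hext s hs
        have hslen : idx < s.toList.length := by
          have := pvLcp_le_left s.toList first.toList
          omega
        rw [← hxs, hg s (by omega), hg first (by omega)]
        exact getD_eq_of_lt_pvLcp s.toList first.toList idx (by omega)
    rw [if_neg (by simpa using hconst), if_pos (by omega)]
    exact ih (idx + 1) (by omega) (by omega)

theorem string_eq_of_toList (s t : String) (h : s.toList = t.toList) : s = t := by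
  have := congrArg String.ofList h
  simpa using this

-- under Pre_ ∧ ¬D_: both ports return p - cpl (the shared body of the verdict proof)
theorem main_eq (first : String) (rest : List String)
    (hnr : ∀ s ∈ first :: rest, s ≠ first → s.toList <+: first.toList →
        ¬ (∀ t ∈ first :: rest, s.toList <+: t.toList))
    (hemp : first = "" → ∀ s ∈ first :: rest, s = "") :
    (¬ ((∀ s ∈ first :: rest, first.toList <+: s.toList) ∧
        ¬ (∀ s ∈ first :: rest, s = first))) →
    get_depthoftree_zipcode (first :: rest) = get_depthoftree_zipcode_alt (first :: rest) := by
  intro hnd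
  unfold get_depthoftree_zipcode get_depthoftree_zipcode_alt
  simp only [PySem.List.pyGet?_zero_cons, Option.getD_some]
  set fc := first.toList with hfc
  set p := fc.length with hpdef
  set cpl := rest.foldl (fun L s => min L (pvLcp s.toList fc)) p with hcpl
  have hcle : cpl ≤ p := foldl_min_le_init _ rest p
  have hslice : PySem.List.slice (first :: rest) (some 1) none = rest := by
    simp [PySem.List.slice_from]
  have hBfold : (PySem.List.slice (first :: rest) (some 1) none).foldl
      (fun L s => pvBLcp s.toList fc (min L s.toList.length) 0) p = cpl := by
    rw [hslice, foldl_pvBLcp_eq fc rest p (by omega)]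
  by_cases hall : ∀ s ∈ rest, s = first
  · have hset : (PySem.Set.ofList (first :: rest)).length = 1 :=
      (set_len_one_iff first rest).mpr (by
        intro x hx
        rcases List.mem_cons.mp hx with hx | hx
        · exact hx
        · exact hall x hx)
    rw [if_pos hset, hBfold]
    have hcp : cpl = p := by
      have h1 : p ≤ cpl := by
        apply le_foldl_min _ rest p p (le_refl p)
        intro s hs
        rw [hall s hs, ← hfc, pvLcp_self]
      omega
    rw [hcp]
    omega
  · have hset : (PySem.Set.ofList (first :: rest)).length ≠ 1 := by
      intro h
      exact hall (fun s hs => (set_len_one_iff first rest).mp h s (by simp [hs]))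
    rw [if_neg hset, hBfold]
    -- ¬D_ together with ¬all-equal yields a later string not extending first, so cpl < p
    have hex : ∃ s ∈ rest, ¬ fc <+: s.toList := by
      by_contra hno
      push Not at hno
      apply hnd
      constructor
      · intro s hs
        rcases List.mem_cons.mp hs with hs | hs
        · subst hs; exact List.prefix_refl _
        · exact hno s hs
      · intro hall2
        exact hall (fun s hs => hall2 s (by simp [hs]))
    obtain ⟨s, hs, hnp⟩ := hex
    have hlt : cpl < p := by
      have h1 : cpl ≤ pvLcp s.toList fc := foldl_min_le_mem _ rest p s hs
      have h2 : pvLcp s.toList fc ≤ p := pvLcp_le_right _ _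
      have h3 : pvLcp s.toList fc ≠ p := by
        intro h
        exact hnp (prefix_right_of_pvLcp s.toList fc (by rw [h, hpdef]))
      omega
    -- Pre_ (A does not raise) yields a minimizer with a real mismatch character
    have hmin : ∃ u ∈ rest, pvLcp u.toList fc = cpl ∧ cpl < u.toList.length := by
      rcases foldl_min_cases (fun u => pvLcp u.toList fc) rest p with h | ⟨u, hu, h⟩
      · omega
      · have hle : pvLcp u.toList fc ≤ u.toList.length := pvLcp_le_left _ _
        by_cases hcase : cpl < u.toList.length
        · exact ⟨u, hu, by omega, hcase⟩
        · exfalso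
          have hlen : pvLcp u.toList fc = u.toList.length := by omega
          have hup : u.toList <+: fc := prefix_left_of_pvLcp _ _ hlen
          have hune : u ≠ first := by
            intro he
            have hself : pvLcp u.toList fc = fc.length := by
              rw [he, ← hfc]
              exact pvLcp_self fc
            omega
          have hnall := hnr u (by simp [hu]) hune hup
          push Not at hnall
          obtain ⟨t, ht, hnt⟩ := hnall
          rcases List.mem_cons.mp ht with ht' | ht'
          · exact hnt (ht' ▸ hup)
          · have hct : cpl ≤ pvLcp t.toList fc := foldl_min_le_mem _ rest p t ht'
            have hut : u.toList = fc.take cpl := by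
              have := List.prefix_iff_eq_take.mp hup
              rw [this]
              congr 1
              omega
            have htake : fc.take cpl <+: t.toList :=
              take_prefix_of_le_pvLcp t.toList fc cpl hct
            exact hnt (hut ▸ htake)
    rw [pvALoop_eq first rest p hpdef cpl hmin hcpl hlt cpl 0 (by omega) (by omega)]

-- ===== VERDICT (by name: the statement is the Claim_ definition above) =====
theorem get_depthoftree_zipcode_spec : Claim_unchanged_get_depthoftree_zipcode := by
  intro attribute_ hDom hPre hnd
  obtain ⟨hne, hnr, hemp⟩ := hPre
  match attribute_, hne with
  | first :: rest, _ =>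
    simp only [List.headD_cons] at hnr hemp
    have hnd' : ¬ ((∀ s ∈ first :: rest, first.toList <+: s.toList) ∧
        ¬ (∀ s ∈ first :: rest, s = first)) := by
      unfold D_get_depthoftree_zipcode at hnd
      simpa using hnd
    exact main_eq first rest hnr hemp hnd'

theorem get_depthoftree_zipcode_changed : Claim_changed_get_depthoftree_zipcode := by
  unfold Claim_changed_get_depthoftree_zipcode pvDiffWitness_get_depthoftree_zipcode
    pvDiffWitnessOut_get_depthoftree_zipcode
  refine ⟨by decide, by decide, by decide, ?_, ?_, by decide⟩
  · rw [get_depthoftree_zipcode]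
    rw [pvALoop]
    norm_num [PySem.Set.ofList, PySem.Set.add, PySem.Set.contains, PySem.List.pyGet?,
      PySem.Str.pyGet?, PySem.Chars.pyGet?, PySem.List.pyIdx?]
    decide
  · rw [get_depthoftree_zipcode_alt]
    norm_num [PySem.List.slice, PySem.List.slice?, PySem.List.pyGet?, PySem.List.pyIdx?]
    rw [pvBLcp]
    norm_num [PySem.List.pyGet?, PySem.List.pyIdx?, show "a".length = 1 by decide,
      show "ab".length = 2 by decide, show "ab".toList[0] = "a".toList[0] by decide]
    rw [pvBLcp]
    norm_num

theorem get_depthoftree_zipcode_tight : Claim_exact_get_depthoftree_zipcode := by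
  intro attribute_ hDom hPre hD
  obtain ⟨hne, hnr, hemp⟩ := hPre
  obtain ⟨hext, hneq⟩ := hD
  match attribute_, hne with
  | first :: rest, _ =>
    simp only [List.headD_cons] at hext hneq hemp
    unfold get_depthoftree_zipcode get_depthoftree_zipcode_alt
    simp only [PySem.List.pyGet?_zero_cons, Option.getD_some]
    set fc := first.toList with hfc
    set p := fc.length with hpdef
    have hp1 : 1 ≤ p := by
      rcases Nat.eq_zero_or_pos p with h0 | h
      · exfalso
        have hfe : first = "" := by
          apply string_eq_of_toList
          rw [← hfc] at *
          simpa using List.length_eq_zero_iff.mp (by omega)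
        apply hneq
        intro s hs
        rw [hemp hfe s hs, hfe]
      · exact h
    have hextL : ∀ s ∈ rest, p ≤ pvLcp s.toList fc := by
      intro s hs
      rw [pvLcp_of_prefix_right s.toList fc (hext s (by simp [hs]))]
    have hset : (PySem.Set.ofList (first :: rest)).length ≠ 1 := by
      intro h
      exact hneq ((set_len_one_iff first rest).mp h)
    rw [if_neg hset]
    have hA : pvALoop (first :: rest) p 0 = p - 1 :=
      pvALoop_nobreak first rest p hpdef hextL hp1 (p - 1 - 0) 0 rfl (by omega)
    have hB : (PySem.List.slice (first :: rest) (some 1) none).foldl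
        (fun L s => pvBLcp s.toList fc (min L s.toList.length) 0) p = p := by
      have hslice : PySem.List.slice (first :: rest) (some 1) none = rest := by
        simp [PySem.List.slice_from]
      rw [hslice, foldl_pvBLcp_eq fc rest p (le_refl p)]
      have h1 : p ≤ rest.foldl (fun L s => min L (pvLcp s.toList fc)) p :=
        le_foldl_min _ rest p p (le_refl p) hextL
      have h2 := foldl_min_le_init (fun s => pvLcp s.toList fc) rest p
      omega
    rw [hA, hB]
    intro hcontra
    omega
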